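-- pv_equiv track=rewrite | github.com/vtoolsid/somajournal | training/scripts/integration_example.py | _categorize_emotions
-- ===== SOURCE A (Python) =====
-- from typing import Dict, List, Optional
--
-- def _categorize_emotions(emotions: List[Dict]) -> Dict:
--     """Categorize emotions into positive, negative, and neutral."""
--     positive_emotions = {
--         'admiration', 'amusement', 'approval', 'caring', 'excitement',
--         'gratitude', 'joy', 'love', 'optimism', 'pride', 'relief'
--     }
--
--     negative_emotions = {
--         'anger', 'annoyance', 'disappointment', 'disapproval', 'disgust',
--         'embarrassment', 'fear', 'grief', 'nervousness', 'remorse', 'sadness'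
--     }
--
--     categories = {
--         'positive': [],
--         'negative': [],
--         'ambiguous': [],
--         'neutral': []
--     }
--
--     for emotion in emotions:
--         emotion_name = emotion['emotion']
--         if emotion_name in positive_emotions:
--             categories['positive'].append(emotion)
--         elif emotion_name in negative_emotions:
--             categories['negative'].append(emotion)
--         elif emotion_name == 'neutral':
--             categories['neutral'].append(emotion)
--         else:
--             categories['ambiguous'].append(emotion)
--
--     return categories
-- ===== SOURCE B (Python) =====
-- # B: classify by a pure labelling function and build each bucket as its own
-- # filter pass (four staged comprehensions), instead of A's single pass that
-- # mutates four accumulator lists.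
--
-- _POSITIVE = frozenset({
--     'admiration', 'amusement', 'approval', 'caring', 'excitement',
--     'gratitude', 'joy', 'love', 'optimism', 'pride', 'relief'
-- })
-- _NEGATIVE = frozenset({
--     'anger', 'annoyance', 'disappointment', 'disapproval', 'disgust',
--     'embarrassment', 'fear', 'grief', 'nervousness', 'remorse', 'sadness'
-- })
--
--
-- def _label(emotion):
--     name = emotion['emotion']
--     if name in _POSITIVE:
--         return 'positive'
--     if name in _NEGATIVE:
--         return 'negative'
--     if name == 'neutral':
--         return 'neutral'
--     return 'ambiguous'
--
--
-- def _categorize_emotions(emotions):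
--     return {cat: [e for e in emotions if _label(e) == cat]
--             for cat in ('positive', 'negative', 'ambiguous', 'neutral')}
-- ===== Notes on version B (the rewrite author's own statement) =====
-- stated objective: alternative
-- what changed: Replaces A's single pass that mutates four accumulator lists with a pure labelling function and four independent filter passes (one comprehension per category), trading one mutating pass for staged declarative passes.
import Mathlib
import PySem

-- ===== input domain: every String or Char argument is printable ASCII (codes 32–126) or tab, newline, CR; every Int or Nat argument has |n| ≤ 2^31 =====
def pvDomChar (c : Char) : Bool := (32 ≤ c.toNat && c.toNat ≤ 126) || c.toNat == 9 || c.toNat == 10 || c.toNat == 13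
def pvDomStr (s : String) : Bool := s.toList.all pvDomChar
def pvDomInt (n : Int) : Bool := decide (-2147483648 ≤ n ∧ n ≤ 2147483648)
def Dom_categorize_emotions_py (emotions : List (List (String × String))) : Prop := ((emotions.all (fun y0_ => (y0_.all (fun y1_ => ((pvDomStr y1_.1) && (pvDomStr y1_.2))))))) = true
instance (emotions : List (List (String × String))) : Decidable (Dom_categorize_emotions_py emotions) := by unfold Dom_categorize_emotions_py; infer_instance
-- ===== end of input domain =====

-- B replaces A's single mutating pass over four accumulator lists with a pure labelling
-- function and four independent filter passes; equivalence proved on inputs where every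
-- record has an 'emotion' key (Python A raises KeyError otherwise).

-- ===== PORT A =====
def positiveEmotions : List String :=
  ["admiration", "amusement", "approval", "caring", "excitement",
   "gratitude", "joy", "love", "optimism", "pride", "relief"]

def negativeEmotions : List String :=
  ["anger", "annoyance", "disappointment", "disapproval", "disgust",
   "embarrassment", "fear", "grief", "nervousness", "remorse", "sadness"]

-- one iteration of A's for-loop (Python raises KeyError when 'emotion' is missing; excluded by Pre_)
def stepA (cat : PySem.Dict String (List (List (String × String))))
    (e : List (String × String)) : PySem.Dict String (List (List (String × String))) :=
  match (PySem.Dict.mk e).get? "emotion" with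
  | none => cat
  | some name =>
    if positiveEmotions.contains name then cat.modify "positive" [] (· ++ [e])
    else if negativeEmotions.contains name then cat.modify "negative" [] (· ++ [e])
    else if name == "neutral" then cat.modify "neutral" [] (· ++ [e])
    else cat.modify "ambiguous" [] (· ++ [e])

def categorize_emotions_py (emotions : List (List (String × String))) :
    List (String × List (List (String × String))) :=
  (emotions.foldl stepA
    (PySem.Dict.ofList [("positive", []), ("negative", []), ("ambiguous", []), ("neutral", [])])).items

-- ===== PORT B =====
-- B's _label helper (same KeyError case expressed as none, excluded by Pre_)
def labelB (e : List (String × String)) : Option String :=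
  match (PySem.Dict.mk e).get? "emotion" with
  | none => none
  | some name =>
    some (if positiveEmotions.contains name then "positive"
          else if negativeEmotions.contains name then "negative"
          else if name == "neutral" then "neutral"
          else "ambiguous")

-- B's dict comprehension: one filter pass per category
def categorize_emotions_py_alt (emotions : List (List (String × String))) :
    List (String × List (List (String × String))) :=
  ["positive", "negative", "ambiguous", "neutral"].map
    (fun cat => (cat, emotions.filter (fun e => labelB e == some cat)))

-- ===== PRECONDITION & SPEC =====
-- Pre_ excludes exactly the inputs on which Python A raises KeyError: a record without an 'emotion' key.
def Pre_categorize_emotions_py (emotions : List (List (String × String))) : Prop :=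
  emotions.all (fun e => e.any (fun p => p.1 == "emotion")) = true

instance (emotions : List (List (String × String))) : Decidable (Pre_categorize_emotions_py emotions) := by
  unfold Pre_categorize_emotions_py; infer_instance

def pvWitness_categorize_emotions_py : (List (List (String × String))) :=
  [[("emotion", "joy"), ("score", "0.9")], [("emotion", "surprise")]]

def Spec_categorize_emotions_py (emotions : List (List (String × String))) (out : List (String × List (List (String × String)))) : Prop := out = categorize_emotions_py_alt emotions
instance (emotions : List (List (String × String))) (out : List (String × List (List (String × String)))) : Decidable (Spec_categorize_emotions_py emotions out) := by unfold Spec_categorize_emotions_py; infer_instance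

-- ===== CLAIM (what is proved, stated in full; the proofs are below) =====
def Claim_equal_categorize_emotions_py : Prop := ∀ (emotions : List (List (String × String))), Dom_categorize_emotions_py emotions → Pre_categorize_emotions_py emotions → Spec_categorize_emotions_py emotions (categorize_emotions_py emotions)

-- ===== LEMMAS AND PROOFS =====

-- invariant of A's loop: after folding, each bucket holds its accumulator followed by
-- the records B's filter pass for that category selects
theorem foldA_items (es : List (List (String × String)))
    (p n a m : List (List (String × String))) :
    (es.foldl stepA
      (PySem.Dict.ofList [("positive", p), ("negative", n), ("ambiguous", a), ("neutral", m)])).items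
    = [("positive", p ++ es.filter (fun e => labelB e == some "positive")),
       ("negative", n ++ es.filter (fun e => labelB e == some "negative")),
       ("ambiguous", a ++ es.filter (fun e => labelB e == some "ambiguous")),
       ("neutral", m ++ es.filter (fun e => labelB e == some "neutral"))] := by
  induction es generalizing p n a m with
  | nil =>
    simp [PySem.Dict.ofList, PySem.Dict.insert, PySem.Dict.update, PySem.Dict.empty]
  | cons e es ih =>
    rw [List.foldl_cons]
    cases h : (PySem.Dict.mk e).get? "emotion" with
    | none =>
      have hl : labelB e = none := by simp [labelB, h]
      simp only [stepA, h, List.filter_cons, hl]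
      simpa using ih p n a m
    | some name =>
      have hl : labelB e = some (if positiveEmotions.contains name then "positive"
          else if negativeEmotions.contains name then "negative"
          else if name == "neutral" then "neutral" else "ambiguous") := by
        simp [labelB, h]
      simp only [stepA, h]
      split_ifs with h1 h2 h3
      · rw [show (PySem.Dict.ofList [("positive", p), ("negative", n), ("ambiguous", a), ("neutral", m)]).modify "positive" [] (· ++ [e])
              = PySem.Dict.ofList [("positive", p ++ [e]), ("negative", n), ("ambiguous", a), ("neutral", m)] by
              simp [PySem.Dict.modify, PySem.Dict.ofList, PySem.Dict.insert, PySem.Dict.getD, PySem.Dict.get?, PySem.Dict.update, PySem.Dict.empty],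
          ih]
        simp only [List.contains_iff_mem] at h1
        simp [hl, h1]
      · rw [show (PySem.Dict.ofList [("positive", p), ("negative", n), ("ambiguous", a), ("neutral", m)]).modify "negative" [] (· ++ [e])
              = PySem.Dict.ofList [("positive", p), ("negative", n ++ [e]), ("ambiguous", a), ("neutral", m)] by
              simp [PySem.Dict.modify, PySem.Dict.ofList, PySem.Dict.insert, PySem.Dict.getD, PySem.Dict.get?, PySem.Dict.update, PySem.Dict.empty],
          ih]
        simp only [List.contains_iff_mem] at h1 h2
        simp [hl, h1, h2]
      · rw [show (PySem.Dict.ofList [("positive", p), ("negative", n), ("ambiguous", a), ("neutral", m)]).modify "neutral" [] (· ++ [e])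
              = PySem.Dict.ofList [("positive", p), ("negative", n), ("ambiguous", a), ("neutral", m ++ [e])] by
              simp [PySem.Dict.modify, PySem.Dict.ofList, PySem.Dict.insert, PySem.Dict.getD, PySem.Dict.get?, PySem.Dict.update, PySem.Dict.empty],
          ih]
        simp only [List.contains_iff_mem] at h1 h2
        simp only [beq_iff_eq] at h3
        simp [List.filter_cons, hl, h3]
        decide
      · rw [show (PySem.Dict.ofList [("positive", p), ("negative", n), ("ambiguous", a), ("neutral", m)]).modify "ambiguous" [] (· ++ [e])
              = PySem.Dict.ofList [("positive", p), ("negative", n), ("ambiguous", a ++ [e]), ("neutral", m)] by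
              simp [PySem.Dict.modify, PySem.Dict.ofList, PySem.Dict.insert, PySem.Dict.getD, PySem.Dict.get?, PySem.Dict.update, PySem.Dict.empty],
          ih]
        simp only [List.contains_iff_mem] at h1 h2
        simp only [beq_iff_eq] at h3
        simp [hl, h1, h2, h3]

-- ===== VERDICT (by name: the statement is the Claim_ definition above) =====
theorem categorize_emotions_py_spec : Claim_equal_categorize_emotions_py := by
  intro emotions _ _
  unfold Spec_categorize_emotions_py categorize_emotions_py categorize_emotions_py_alt
  rw [foldA_items]
  simp
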